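-- pv_equiv track=rewrite | github.com/jw47lee/Nonogram_AI | solver.py | check_row_or_col
-- ===== SOURCE A (Python) =====
-- def check_row_or_col(state, row_const):
--     row_result = []
--     check_state = state.split("0")
--     for i in check_state:
--         n = len(i)
--         if(n != 0):
--             row_result.append(n)
--
--     return row_result == row_const
-- ===== SOURCE B (Python) =====
-- def check_row_or_col(state, row_const):
--     row_result = []
--     run = 0
--     for ch in state:
--         if ch != '0':
--             run += 1
--         elif run:
--             row_result.append(run)
--             run = 0
--     if run:
--         row_result.append(run)
--     return row_result == row_const
-- ===== Notes on version B (the rewrite author's own statement) =====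
-- stated objective: alternative
-- what changed: Replaces split('0') plus a pass over the substrings with a single character scan that keeps an integer run counter and flushes it at each '0' and at the end, never materialising the substrings.
import Mathlib
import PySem

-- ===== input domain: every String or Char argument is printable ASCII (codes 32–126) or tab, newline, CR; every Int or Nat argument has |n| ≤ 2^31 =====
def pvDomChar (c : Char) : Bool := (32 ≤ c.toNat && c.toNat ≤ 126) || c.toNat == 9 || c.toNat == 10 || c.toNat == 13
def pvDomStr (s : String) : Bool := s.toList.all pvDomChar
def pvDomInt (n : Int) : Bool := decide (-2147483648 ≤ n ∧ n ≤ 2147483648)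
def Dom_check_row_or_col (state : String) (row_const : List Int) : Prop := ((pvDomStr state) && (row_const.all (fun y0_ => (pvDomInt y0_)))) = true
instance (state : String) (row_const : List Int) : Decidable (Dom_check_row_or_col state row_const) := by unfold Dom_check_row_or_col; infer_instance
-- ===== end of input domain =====

-- B replaces split("0") + a pass over the substrings by a single character scan with a run counter (alternative decomposition, same cost).


-- ===== PORT A =====
def check_row_or_col (state : String) (row_const : List Int) : Bool :=
  let check_state := (PySem.Str.split? state "0").getD []
  let row_result := check_state.foldl (fun acc i =>
    let n : Int := PySem.Str.len i
    if n ≠ 0 then acc ++ [n] else acc) []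
  row_result == row_const

-- ===== PORT B =====
def check_row_or_col_alt (state : String) (row_const : List Int) : Bool :=
  let q := state.toList.foldl (fun (p : List Int × Int) ch =>
    if ch ≠ '0' then (p.1, p.2 + 1)
    else if p.2 ≠ 0 then (p.1 ++ [p.2], 0) else p) (([] : List Int), (0 : Int))
  (if q.2 ≠ 0 then q.1 ++ [q.2] else q.1) == row_const

-- ===== PRECONDITION & SPEC =====
def Spec_check_row_or_col (state : String) (row_const : List Int) (out : Bool) : Prop := out = check_row_or_col_alt state row_const
instance (state : String) (row_const : List Int) (out : Bool) : Decidable (Spec_check_row_or_col state row_const out) := by unfold Spec_check_row_or_col; infer_instance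

-- ===== CLAIM (what is proved, stated in full; the proofs are below) =====
def Claim_equal_check_row_or_col : Prop := ∀ (state : String) (row_const : List Int), Dom_check_row_or_col state row_const → Spec_check_row_or_col state row_const (check_row_or_col state row_const)

-- ===== LEMMAS AND PROOFS =====

/-- Simple structural recursion computing Python's `s.split("0")` on a char list. -/
def split0 : List Char → List (List Char)
  | [] => [[]]
  | c :: rest => if c = '0' then [] :: split0 rest
                 else (split0 rest).modifyHead (fun p => c :: p)

theorem split0_ne_nil (cs : List Char) : split0 cs ≠ [] := by
  induction cs with
  | nil => simp [split0]
  | cons c rest ih =>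
    simp only [split0]
    split_ifs
    · simp
    · cases h : split0 rest with
      | nil => exact absurd h ih
      | cons p ps => simp

theorem go_eq (fuel : Nat) (cs cur : List Char) (acc : List (List Char))
    (h : cs.length ≤ fuel) :
    PySem.Chars.splitOn.go ['0'] fuel cs cur acc
      = acc.reverse ++ (split0 cs).modifyHead (fun p => cur.reverse ++ p) := by
  induction fuel generalizing cs cur acc with
  | zero =>
    have : cs = [] := by cases cs <;> simp_all
    subst this
    simp [PySem.Chars.splitOn.go, split0]
  | succ fuel ih =>
    cases cs with
    | nil => simp [PySem.Chars.splitOn.go, split0]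
    | cons c rest =>
      by_cases hc : c = '0'
      · subst hc
        have hpre : List.isPrefixOf ['0'] ('0' :: rest) = true := by
          simp [List.isPrefixOf]
        rw [PySem.Chars.splitOn.go]
        simp only [hpre, if_pos]
        rw [show List.drop (['0'] : List Char).length ('0' :: rest) = rest from rfl]
        rw [ih rest [] (cur.reverse :: acc) (by simpa using Nat.le_of_succ_le_succ (by simpa using h))]
        obtain ⟨p, ps, hps⟩ := List.exists_cons_of_ne_nil (split0_ne_nil rest)
        simp [split0, hps]
      · have hpre : List.isPrefixOf ['0'] (c :: rest) = false := by
          simp [List.isPrefixOf]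
          exact fun hh => absurd hh.symm hc
        rw [PySem.Chars.splitOn.go]
        simp only [hpre]
        rw [ih rest (c :: cur) acc (by simpa using Nat.le_of_succ_le_succ (by simpa using h))]
        obtain ⟨p, ps, hps⟩ := List.exists_cons_of_ne_nil (split0_ne_nil rest)
        simp [split0, hps, hc]

theorem splitOn_eq_split0 (cs : List Char) :
    PySem.Chars.splitOn cs ['0'] = split0 cs := by
  have := go_eq (cs.length + 1) cs [] [] (by omega)
  obtain ⟨p, ps, hps⟩ := List.exists_cons_of_ne_nil (split0_ne_nil cs)
  simpa [PySem.Chars.splitOn, hps] using this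

/-- A's accumulation step on a raw char-list piece. -/
def step2 (a : List Int) (p : List Char) : List Int :=
  if (p.length : Int) ≠ 0 then a ++ [(p.length : Int)] else a

/-- B's scanning step. -/
def stepB (p : List Int × Int) (ch : Char) : List Int × Int :=
  if ch ≠ '0' then (p.1, p.2 + 1)
  else if p.2 ≠ 0 then (p.1 ++ [p.2], 0) else p

/-- A's fold starting from (res, run) seen through split0. -/
def runsFrom : List (List Char) → List Int → Int → List Int
  | [], res, run => if run ≠ 0 then res ++ [run] else res
  | p :: ps, res, run =>
      ps.foldl step2 (if run + (p.length : Int) ≠ 0 then res ++ [run + (p.length : Int)] else res)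

theorem scan_eq_runsFrom (cs : List Char) (res : List Int) (run : Int) :
    (if (cs.foldl stepB (res, run)).2 ≠ 0
       then (cs.foldl stepB (res, run)).1 ++ [(cs.foldl stepB (res, run)).2]
       else (cs.foldl stepB (res, run)).1) = runsFrom (split0 cs) res run := by
  induction cs generalizing res run with
  | nil => simp [runsFrom, split0]
  | cons c rest ih =>
    by_cases hc : c = '0'
    · subst hc
      have hstep : stepB (res, run) '0' = (if run ≠ 0 then res ++ [run] else res, 0) := by
        by_cases hr : run = 0 <;> simp [stepB, hr]
      obtain ⟨p, ps, hps⟩ := List.exists_cons_of_ne_nil (split0_ne_nil rest)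
      simp only [List.foldl_cons, hstep]
      rw [ih (if run ≠ 0 then res ++ [run] else res) 0, hps]
      simp [split0, hps, runsFrom, step2]
    · obtain ⟨p, ps, hps⟩ := List.exists_cons_of_ne_nil (split0_ne_nil rest)
      have hstep : stepB (res, run) c = (res, run + 1) := by simp [stepB, hc]
      simp only [List.foldl_cons, hstep]
      rw [ih res (run + 1), hps]
      simp only [split0, hps]
      rw [if_neg hc]
      simp only [List.modifyHead, runsFrom]
      have hlen : run + (((c :: p).length : Nat) : Int) = run + 1 + (p.length : Int) := by
        push_cast [List.length_cons]; ring
      rw [hlen]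

-- ===== VERDICT (by name: the statement is the Claim_ definition above) =====
theorem check_row_or_col_spec : Claim_equal_check_row_or_col := by
  intro state row_const _
  unfold Spec_check_row_or_col check_row_or_col check_row_or_col_alt
  have hs : PySem.Str.split? state "0" = some ((split0 state.toList).map String.ofList) := by
    simp [PySem.Str.split?, PySem.Chars.split?, splitOn_eq_split0]
  rw [hs]
  simp only [Option.getD_some, List.foldl_map]
  have hfun : (fun (acc : List Int) p =>
      let n : Int := PySem.Str.len (String.ofList p)
      if n ≠ 0 then acc ++ [n] else acc) = step2 := by
    funext a p
    simp [step2, PySem.Str.len]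
  have hB : (fun (p : List Int × Int) ch =>
      if ch ≠ '0' then (p.1, p.2 + 1)
      else if p.2 ≠ 0 then (p.1 ++ [p.2], 0) else p) = stepB := rfl
  rw [hfun, hB, scan_eq_runsFrom state.toList [] 0]
  obtain ⟨p, ps, hps⟩ := List.exists_cons_of_ne_nil (split0_ne_nil state.toList)
  rw [hps]
  simp [runsFrom, step2]
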